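-- pv_equiv track=rewrite | github.com/jloutey-hash/geovac | geovac/nuclear/nuclear_hamiltonian.py | _compute_qwc_groups
-- ===== SOURCE A (Python) =====
-- from typing import Any, Dict, List, Optional, Tuple
--
-- def _compute_qwc_groups(pauli_dict: Dict[str, float]) -> List[List[str]]:
--     """Compute qubitwise commuting groups via greedy coloring."""
--     terms = list(pauli_dict.keys())
--     if not terms:
--         return []
--
--     def _qwc(a: str, b: str) -> bool:
--         for ca, cb in zip(a, b):
--             if ca == 'I' or cb == 'I':
--                 continue
--             if ca != cb:
--                 return False
--         return True
--
--     groups: List[List[str]] = []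
--     for term in terms:
--         placed = False
--         for group in groups:
--             if all(_qwc(term, other) for other in group):
--                 group.append(term)
--                 placed = True
--                 break
--         if not placed:
--             groups.append([term])
--     return groups
-- ===== SOURCE B (Python) =====
-- from typing import Dict, List
--
-- def _compute_qwc_groups(pauli_dict: Dict[str, float]) -> List[List[str]]:
--     """Greedy QWC grouping keeping a merged per-group Pauli profile.
--
--     Instead of re-checking a new term against every member of a group,
--     each group carries one merged profile (the non-identity letter seen at
--     each position, 'I' where none); one term is checked against one profile
--     per group rather than against every member.
--     """
--     state: List[List] = []  # pairs [group, profile]; profile is a list of chars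
--     for term, _coeff in pauli_dict.items():
--         for entry in state:
--             profile = entry[1]
--             n = min(len(profile), len(term))
--             ok = True
--             for i in range(n):
--                 pc = profile[i]
--                 tc = term[i]
--                 if pc != 'I' and tc != 'I' and pc != tc:
--                     ok = False
--                     break
--             if ok:
--                 entry[0].append(term)
--                 # merge term into the profile, extending it if term is longer
--                 for i in range(n):
--                     if profile[i] == 'I':
--                         profile[i] = term[i]
--                 profile.extend(term[n:])
--                 break
--         else:
--             state.append([[term], list(term)])
--     return [group for group, _profile in state]
-- ===== Notes on version B (the rewrite author's own statement) =====
-- stated objective: alternative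
-- what changed: B keeps one merged Pauli profile per group and checks/updates that profile in O(L) per group, instead of A's inner scan that re-runs the pairwise QWC test against every member of every group; same result, O(T*G*L) vs O(T^2*L) (equal when every term conflicts).
import Mathlib
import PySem

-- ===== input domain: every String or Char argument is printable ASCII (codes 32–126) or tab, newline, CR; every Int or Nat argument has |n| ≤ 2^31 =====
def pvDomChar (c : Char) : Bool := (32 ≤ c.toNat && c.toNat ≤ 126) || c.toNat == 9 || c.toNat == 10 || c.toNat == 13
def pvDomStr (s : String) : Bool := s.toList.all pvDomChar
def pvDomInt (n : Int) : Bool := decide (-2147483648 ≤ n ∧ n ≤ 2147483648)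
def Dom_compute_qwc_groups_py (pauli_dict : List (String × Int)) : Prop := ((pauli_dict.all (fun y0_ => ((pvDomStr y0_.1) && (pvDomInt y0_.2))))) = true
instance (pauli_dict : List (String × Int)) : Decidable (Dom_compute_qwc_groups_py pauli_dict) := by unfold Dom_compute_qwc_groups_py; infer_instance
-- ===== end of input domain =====

-- B replaces A's inner scan over all group members by one merged per-group Pauli
-- profile checked/updated per group; objective: alternative (per-group profile vs member rescans).

-- ===== PORT A =====
-- the nested helper `_qwc(a, b)`: loop over zip(a, b)
def pyQwc : List Char → List Char → Bool
  | ca :: as_, cb :: bs => if ca = 'I' ∨ cb = 'I' then pyQwc as_ bs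
                           else if ca ≠ cb then false
                           else pyQwc as_ bs
  | _, _ => true

-- A's body of the `for term in terms` loop: scan groups for the first one whose
-- every member is qwc with `term`, append there; else append a new group at the end
def placeA : List (List String) → String → List (List String)
  | [], term => [[term]]
  | g :: gs, term =>
      if g.all (fun other => pyQwc term.toList other.toList)
      then (g ++ [term]) :: gs
      else g :: placeA gs term

def compute_qwc_groups_py (pauli_dict : List (String × Int)) : List (List String) :=
  let terms := (PySem.Dict.ofList pauli_dict).keys
  if terms = [] then []
  else terms.foldl placeA []

-- ===== PORT B =====
-- B's inner compatibility loop over the first min(len profile, len term) positions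
def compatB : List Char → List Char → Bool
  | pc :: ps, tc :: ts => if pc ≠ 'I' ∧ tc ≠ 'I' ∧ pc ≠ tc then false else compatB ps ts
  | _, _ => true

-- B's in-place profile update (overwrite 'I's, then extend with term's tail)
def mergeB : List Char → List Char → List Char
  | pc :: ps, tc :: ts => (if pc = 'I' then tc else pc) :: mergeB ps ts
  | [], ts => ts
  | ps, [] => ps

-- B's `for entry in state … else append` loop body for one term
def placeB : List (List String × List Char) → String → List (List String × List Char)
  | [], term => [([term], term.toList)]
  | (g, p) :: rest, term =>
      if compatB p term.toList
      then (g ++ [term], mergeB p term.toList) :: rest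
      else (g, p) :: placeB rest term

def compute_qwc_groups_py_alt (pauli_dict : List (String × Int)) : List (List String) :=
  (((PySem.Dict.ofList pauli_dict).items.foldl (fun st pr => placeB st pr.1) []).map Prod.fst)

-- ===== PRECONDITION & SPEC =====
def Spec_compute_qwc_groups_py (pauli_dict : List (String × Int)) (out : List (List String)) : Prop := out = compute_qwc_groups_py_alt pauli_dict
instance (pauli_dict : List (String × Int)) (out : List (List String)) : Decidable (Spec_compute_qwc_groups_py pauli_dict out) := by unfold Spec_compute_qwc_groups_py; infer_instance

-- ===== CLAIM (what is proved, stated in full; the proofs are below) =====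
def Claim_equal_compute_qwc_groups_py : Prop := ∀ (pauli_dict : List (String × Int)), Dom_compute_qwc_groups_py pauli_dict → Spec_compute_qwc_groups_py pauli_dict (compute_qwc_groups_py pauli_dict)

-- ===== LEMMAS AND PROOFS =====

theorem compatB_symm (a b : List Char) : compatB a b = compatB b a := by
  induction a generalizing b with
  | nil => cases b <;> simp [compatB]
  | cons x xs ih =>
      cases b with
      | nil => simp [compatB]
      | cons y ys =>
          simp only [compatB]
          by_cases h1 : x = 'I' <;> by_cases h2 : y = 'I' <;> by_cases h3 : x = y <;>
            simp [h1, h2, h3, ih, eq_comm]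

theorem pyQwc_eq_compat (a b : List Char) : pyQwc a b = compatB a b := by
  induction a generalizing b with
  | nil => cases b <;> simp [pyQwc, compatB]
  | cons x xs ih =>
      cases b with
      | nil => simp [pyQwc, compatB]
      | cons y ys =>
          simp only [pyQwc, compatB]
          by_cases h1 : x = 'I' <;> by_cases h2 : y = 'I' <;> by_cases h3 : x = y <;>
            simp [h1, h2, h3, ih]

theorem merge_compat (p q : List Char) (h : compatB p q = true) (u : List Char) :
    compatB (mergeB p q) u = (compatB p u && compatB q u) := by
  induction p generalizing q u with
  | nil => cases u <;> simp [mergeB, compatB]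
  | cons a ps ih =>
      cases q with
      | nil => cases u <;> simp [mergeB, compatB]
      | cons b qs =>
          simp only [compatB] at h
          cases u with
          | nil => simp [compatB]
          | cons c us =>
              simp only [mergeB, compatB]
              by_cases h1 : a = 'I'
              · subst h1
                have h' : compatB ps qs = true := by simpa using h
                by_cases h2 : b = 'I' <;> by_cases h3 : c = 'I' <;> by_cases h4 : b = c <;>
                  simp [h2, h3, h4, ih qs h' us, Bool.and_comm]
              · simp only [if_neg h1]
                by_cases hbq : (a ≠ 'I' ∧ b ≠ 'I' ∧ a ≠ b)
                · simp [hbq] at h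
                · simp only [if_neg hbq] at h
                  -- here either b = 'I' or a = b
                  rcases (by tauto : b = 'I' ∨ a = b) with hb | hab
                  · subst hb
                    by_cases h3 : c = 'I' <;> by_cases h4 : a = c <;>
                      simp [h1, h3, h4, ih qs h us]
                  · subst hab
                    by_cases h3 : c = 'I' <;> by_cases h4 : a = c <;>
                      simp [h1, h3, h4, ih qs h us]

/-- Invariant carried for each group of B's state: the profile answers the
all-members compatibility question. -/
def InvP (g : List String) (p : List Char) : Prop :=
  ∀ u : List Char, compatB p u = g.all (fun m => compatB m.toList u)

theorem place_step (st : List (List String × List Char)) (t : String)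
    (h : ∀ pr ∈ st, InvP pr.1 pr.2) :
    placeA (st.map Prod.fst) t = (placeB st t).map Prod.fst ∧
    ∀ pr ∈ placeB st t, InvP pr.1 pr.2 := by
  induction st with
  | nil =>
      refine ⟨rfl, ?_⟩
      intro pr hpr
      simp only [placeB, List.mem_singleton] at hpr
      subst hpr
      intro u; simp [List.all]
  | cons hd rest ih =>
      obtain ⟨g, p⟩ := hd
      have hhd : InvP g p := h ⟨g, p⟩ (by simp)
      have hrest : ∀ pr ∈ rest, InvP pr.1 pr.2 := fun pr hpr => h pr (by simp [hpr])
      have hcheck : g.all (fun other => pyQwc t.toList other.toList) = compatB p t.toList := by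
        have hall : ∀ (gl : List String),
            gl.all (fun other => pyQwc t.toList other.toList) =
            gl.all (fun m => compatB m.toList t.toList) := by
          intro gl
          induction gl with
          | nil => rfl
          | cons x xs ih2 =>
              rw [List.all_cons, List.all_cons, ih2, pyQwc_eq_compat,
                compatB_symm t.toList x.toList]
        rw [hall, hhd]
      by_cases hc : compatB p t.toList = true
      · have hA : placeA (((g, p) :: rest).map Prod.fst) t = (g ++ [t]) :: rest.map Prod.fst := by
          simp [placeA, hcheck, hc]
        have hB : placeB ((g, p) :: rest) t = (g ++ [t], mergeB p t.toList) :: rest := by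
          simp [placeB, hc]
        refine ⟨by rw [hA, hB]; rfl, ?_⟩
        rw [hB]
        intro pr hpr
        simp only [List.mem_cons] at hpr
        rcases hpr with hpr | hpr
        · subst hpr
          intro u
          rw [merge_compat p t.toList hc u, hhd u]
          simp [List.all_append, Bool.and_comm]
        · exact hrest pr hpr
      · have hc' : compatB p t.toList = false := by simpa using hc
        have hA : placeA (((g, p) :: rest).map Prod.fst) t = g :: placeA (rest.map Prod.fst) t := by
          simp [placeA, hcheck, hc']
        have hB : placeB ((g, p) :: rest) t = (g, p) :: placeB rest t := by
          simp [placeB, hc']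
        obtain ⟨ih1, ih2⟩ := ih hrest
        refine ⟨by rw [hA, hB, ih1]; rfl, ?_⟩
        rw [hB]
        intro pr hpr
        simp only [List.mem_cons] at hpr
        rcases hpr with hpr | hpr
        · subst hpr; exact hhd
        · exact ih2 pr hpr

theorem fold_rel (terms : List String) (st : List (List String × List Char))
    (h : ∀ pr ∈ st, InvP pr.1 pr.2) :
    terms.foldl placeA (st.map Prod.fst) = (terms.foldl placeB st).map Prod.fst ∧
    ∀ pr ∈ terms.foldl placeB st, InvP pr.1 pr.2 := by
  induction terms generalizing st with
  | nil => exact ⟨rfl, h⟩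
  | cons t ts ih =>
      obtain ⟨h1, h2⟩ := place_step st t h
      simp only [List.foldl_cons, h1]
      exact ih (placeB st t) h2

-- ===== VERDICT (by name: the statement is the Claim_ definition above) =====
theorem fold_key (terms : List String) :
    (if terms = [] then [] else terms.foldl placeA []) =
    (terms.foldl placeB []).map Prod.fst := by
  by_cases hemp : terms = []
  · simp [hemp]
  · simp only [hemp, if_false]
    have := fold_rel terms [] (by intro pr hpr; simp at hpr)
    simpa using this.1

theorem compute_qwc_groups_py_spec : Claim_equal_compute_qwc_groups_py := by
  intro pauli_dict _
  unfold Spec_compute_qwc_groups_py compute_qwc_groups_py compute_qwc_groups_py_alt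
  rw [show ((PySem.Dict.ofList pauli_dict).items.foldl (fun st pr => placeB st pr.1) [])
       = (((PySem.Dict.ofList pauli_dict).items.map (fun pr => pr.1)).foldl placeB []) from
       (List.foldl_map ..).symm]
  have hk : (PySem.Dict.ofList pauli_dict).items.map (fun pr => pr.1) =
      (PySem.Dict.ofList pauli_dict).keys := by
    simp [PySem.Dict.keys]
  rw [hk]
  exact fold_key _
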